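-- pv_equiv track=rewrite | github.com/rafelafrance/PowerRANGES | ranges/pylib/writers/csv_writer.py | filter_traits
-- ===== SOURCE A (Python) =====
-- from dataclasses import dataclass
-- from itertools import combinations
--
-- COMPARE = {
--     "body_mass": ["body_mass_grams"],
--     "ear_length": ["ear_length_mm"],
--     "embryo_size": ["embryo_size_length_mm", "embryo_size_width_mm"],
--     "forearm_length": ["forearm_length_mm"],
--     "gonad_size": ["gonad_length_mm", "gonad_width_mm"],
--     "hind_foot_length": ["hind_foot_length_mm"],
--     "tail_length": ["tail_length_mm"],
--     "tibia_length": ["tibia_length_mm"],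
--     "total_length": ["total_length_mm"],
--     "tragus_length": ["tragus_length_mm"],
-- }
--
-- DUPE_CHECK = 2
--
-- @dataclass
-- class Contestant:
--     score: dict
--     trait: dict
--
-- def filter_traits(name: str, traits: list[dict], max_traits: int) -> list[dict]:
--     players = [get_score(name, t) for t in traits]
--     winners = [True for _ in range(len(players))]
--
--     for pair in combinations(range(len(traits)), 2):
--         i, j = pair
--         if players[i].score == players[j].score:
--             if max_traits == DUPE_CHECK:
--                 choose_looser(i, j, players, winners)
--             elif (
--                 players[i].trait["_field"] == players[j].trait["_field"]
--                 and players[i].trait["_parser"] != players[j].trait["_parser"]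
--             ):
--                 choose_looser(i, j, players, winners)
--             elif players[i].trait["_field"] != players[j].trait["_field"]:
--                 choose_looser(i, j, players, winners)
--
--     return [p.trait for i, p in enumerate(players) if winners[i]]
--
-- def choose_looser(i, j, players, winners):
--     len1 = len([k for k in players[i].trait if not k.startswith("_")])
--     len2 = len([k for k in players[j].trait if not k.startswith("_")])
--     if len2 > len1:
--         winners[i] = False
--     else:
--         winners[j] = False
--
-- def get_score(name: str, trait: dict) -> Contestant:
--     if keys := COMPARE.get(name):
--         return Contestant(
--             score={k: v for k in keys if (v := trait.get(k) is not None)},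
--             trait=trait,
--         )
--     return Contestant(
--         score={k: v for k, v in trait.items() if not k.startswith("_")},
--         trait=trait,
--     )
-- ===== SOURCE B (Python) =====
-- COMPARE = {
--     "body_mass": ["body_mass_grams"],
--     "ear_length": ["ear_length_mm"],
--     "embryo_size": ["embryo_size_length_mm", "embryo_size_width_mm"],
--     "forearm_length": ["forearm_length_mm"],
--     "gonad_size": ["gonad_length_mm", "gonad_width_mm"],
--     "hind_foot_length": ["hind_foot_length_mm"],
--     "tail_length": ["tail_length_mm"],
--     "tibia_length": ["tibia_length_mm"],
--     "total_length": ["total_length_mm"],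
--     "tragus_length": ["tragus_length_mm"],
-- }
--
--
-- def filter_traits(name: str, traits: list, max_traits: int) -> list:
--     keys = COMPARE.get(name)
--     if keys:
--         scores = [{k: True for k in keys if t.get(k) is not None} for t in traits]
--     else:
--         scores = [{k: v for k, v in t.items() if not k.startswith("_")} for t in traits]
--     nfields = [sum(1 for k in t if not k.startswith("_")) for t in traits]
--
--     # partition indices into groups of mutually equal score (== comparison, no hashing)
--     groups = []
--     for i, s in enumerate(scores):
--         for g in groups:
--             if scores[g[0]] == s:
--                 g.append(i)
--                 break
--         else:
--             groups.append([i])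
--
--     alive = [True] * len(traits)
--     for g in groups:
--         for a in range(len(g)):
--             for b in range(a + 1, len(g)):
--                 i, j = g[a], g[b]
--                 if (max_traits == 2
--                         or traits[i]["_field"] != traits[j]["_field"]
--                         or traits[i]["_parser"] != traits[j]["_parser"]):
--                     if nfields[j] > nfields[i]:
--                         alive[i] = False
--                     else:
--                         alive[j] = False
--     return [t for i, t in enumerate(traits) if alive[i]]
-- ===== Notes on version B (the rewrite author's own statement) =====
-- stated objective: alternative
-- what changed: B first partitions the trait indices into groups of mutually equal score dicts (equality-based scan, no hashing), precomputes each trait's non-underscore field count once, and runs the merged elimination condition (max_traits==2 or differing _field or differing _parser) only on pairs inside a group, instead of A's flat combinations() scan that compares score dicts and recounts fields for every pair.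
import Mathlib
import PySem

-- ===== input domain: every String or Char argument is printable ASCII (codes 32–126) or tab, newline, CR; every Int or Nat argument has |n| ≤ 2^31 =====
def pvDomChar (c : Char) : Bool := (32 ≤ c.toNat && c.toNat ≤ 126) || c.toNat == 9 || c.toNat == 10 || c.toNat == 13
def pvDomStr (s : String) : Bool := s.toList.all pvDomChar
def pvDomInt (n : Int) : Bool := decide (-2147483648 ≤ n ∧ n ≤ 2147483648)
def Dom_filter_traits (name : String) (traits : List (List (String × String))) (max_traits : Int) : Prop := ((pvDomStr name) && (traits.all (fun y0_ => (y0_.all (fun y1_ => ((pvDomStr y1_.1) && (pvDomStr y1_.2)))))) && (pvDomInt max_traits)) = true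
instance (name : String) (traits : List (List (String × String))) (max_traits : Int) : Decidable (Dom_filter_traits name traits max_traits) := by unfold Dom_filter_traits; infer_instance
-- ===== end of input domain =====

-- B replaces A's all-pairs scan (score comparison on every pair of indices) by first
-- partitioning the indices into groups of mutually equal score dicts and then running the
-- (merged) elimination conditions only on pairs inside a group, with the non-underscore
-- field counts precomputed once; objective: alternative structure, same exact result.

-- Shared Python-semantics primitive: Python's `==` on dicts encoded on association lists
-- (order-insensitive mapping equality; lookup is first match, like dict access).
def pyDictEq (a b : List (String × String)) : Bool :=
  (a.all fun p => List.lookup p.1 b == List.lookup p.1 a) &&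
  (b.all fun p => List.lookup p.1 a == List.lookup p.1 b)

-- ===== PORT A =====
-- the module constant COMPARE (a dict str -> list[str]), in insertion order
def pvCOMPARE : List (String × List String) :=
  [("body_mass", ["body_mass_grams"]),
   ("ear_length", ["ear_length_mm"]),
   ("embryo_size", ["embryo_size_length_mm", "embryo_size_width_mm"]),
   ("forearm_length", ["forearm_length_mm"]),
   ("gonad_size", ["gonad_length_mm", "gonad_width_mm"]),
   ("hind_foot_length", ["hind_foot_length_mm"]),
   ("tail_length", ["tail_length_mm"]),
   ("tibia_length", ["tibia_length_mm"]),
   ("total_length", ["total_length_mm"]),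
   ("tragus_length", ["tragus_length_mm"])]

-- Contestant(score, trait) as a pair (score, trait).  In the COMPARE branch the Python
-- score dict maps each present key to True; every stored value is the constant True, so the
-- dict is determined by its keys and we encode it as the list of (key, "") pairs (equality
-- of such dicts is equality of their key sets, which pyDictEq computes exactly).
def get_score (name : String) (trait : List (String × String)) :
    (List (String × String)) × (List (String × String)) :=
  match List.lookup name pvCOMPARE with
  | some keys =>
      -- `if keys := COMPARE.get(name):` — an empty list would be falsy
      if keys.isEmpty then
        (trait.filter (fun p => !(PySem.Str.startswith p.1 "_")), trait)
      else
        ((keys.filter (fun k => (List.lookup k trait).isSome)).map (fun k => (k, "")), trait)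
  | none => (trait.filter (fun p => !(PySem.Str.startswith p.1 "_")), trait)

def choose_looser (i j : Nat)
    (players : List ((List (String × String)) × (List (String × String))))
    (winners : List Bool) : List Bool :=
  let len1 := ((((players[i]?).getD ([], [])).2).filter (fun p => !(PySem.Str.startswith p.1 "_"))).length
  let len2 := ((((players[j]?).getD ([], [])).2).filter (fun p => !(PySem.Str.startswith p.1 "_"))).length
  if len2 > len1 then winners.set i false else winners.set j false

-- trait["_field"] / trait["_parser"]: Python raises KeyError on a missing key; those inputs
-- are excluded by Pre_filter_traits below and the port reads a "" default there.
def filter_traits (name : String) (traits : List (List (String × String))) (max_traits : Int) : List (List (String × String)) :=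
  let players := traits.map (fun t => get_score name t)
  let winners0 := List.replicate players.length true
  -- combinations(range(len(traits)), 2) in lexicographic order
  let pairs := (List.range traits.length).flatMap
    (fun i => ((List.range traits.length).drop (i+1)).map (fun j => (i, j)))
  let winners := pairs.foldl (fun w p =>
    let i := p.1
    let j := p.2
    let pi := (players[i]?).getD ([], [])
    let pj := (players[j]?).getD ([], [])
    if pyDictEq pi.1 pj.1 then
      if max_traits = 2 then choose_looser i j players w
      else if ((List.lookup "_field" pi.2).getD "" == (List.lookup "_field" pj.2).getD "")
              && !((List.lookup "_parser" pi.2).getD "" == (List.lookup "_parser" pj.2).getD "") then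
        choose_looser i j players w
      else if !((List.lookup "_field" pi.2).getD "" == (List.lookup "_field" pj.2).getD "") then
        choose_looser i j players w
      else w
    else w) winners0
  ((PySem.List.enumerate players 0).filter
      (fun q => PySem.List.pyGetD winners q.1 false)).map (fun q => q.2.2)

-- ===== PORT B =====
-- B's score table: one comprehension per branch of COMPARE.get(name) (Source B's `scores`)
def pvScoresOf (name : String) (traits : List (List (String × String))) : List (List (String × String)) :=
  match List.lookup name pvCOMPARE with
  | some keys =>
      if !keys.isEmpty then
        traits.map (fun t => (keys.filter (fun k => (List.lookup k t).isSome)).map (fun k => (k, "")))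
      else
        traits.map (fun t => t.filter (fun p => !(PySem.Str.startswith p.1 "_")))
  | none => traits.map (fun t => t.filter (fun p => !(PySem.Str.startswith p.1 "_")))

-- placing index i into the first group whose representative score equals scores[i]
-- (the inner `for g in groups: … break / else: append` loop of Source B)
def pvPlace (scores : List (List (String × String))) (gs : List (List Nat)) (i : Nat) :
    List (List Nat) :=
  match gs with
  | [] => [[i]]
  | g :: rest =>
      if pyDictEq ((scores[g.headD 0]?).getD []) ((scores[i]?).getD []) then
        (g ++ [i]) :: rest
      else
        g :: pvPlace scores rest i

def filter_traits_alt (name : String) (traits : List (List (String × String))) (max_traits : Int) : List (List (String × String)) :=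
  let scores := pvScoresOf name traits
  let nfields : List Nat := traits.map (fun t => t.countP (fun p => !(PySem.Str.startswith p.1 "_")))
  let groups := (List.range traits.length).foldl (fun gs i => pvPlace scores gs i) []
  let alive0 := List.replicate traits.length true
  let alive := groups.foldl (fun (w : List Bool) (g : List Nat) =>
    (List.range g.length).foldl (fun (w : List Bool) (a : Nat) =>
      ((List.range g.length).drop (a+1)).foldl (fun (w : List Bool) (b : Nat) =>
        let i := (g[a]?).getD 0
        let j := (g[b]?).getD 0
        if decide (max_traits = 2)
           || !((List.lookup "_field" ((traits[i]?).getD [])).getD ""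
                == (List.lookup "_field" ((traits[j]?).getD [])).getD "")
           || !((List.lookup "_parser" ((traits[i]?).getD [])).getD ""
                == (List.lookup "_parser" ((traits[j]?).getD [])).getD "") then
          if (nfields[j]?).getD 0 > (nfields[i]?).getD 0 then
            w.set i false
          else
            w.set j false
        else w) w) w) alive0
  ((PySem.List.enumerate traits 0).filter
      (fun q => PySem.List.pyGetD alive q.1 false)).map (fun q => q.2)

-- ===== PRECONDITION & SPEC =====
-- Pre_'s own copy of the score computation (kept separate from the ports)
def pvPreScore (name : String) (trait : List (String × String)) : List (String × String) :=
  match List.lookup name pvCOMPARE with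
  | some keys =>
      if keys.isEmpty then trait.filter (fun p => !(PySem.Str.startswith p.1 "_"))
      else (keys.filter (fun k => (List.lookup k trait).isSome)).map (fun k => (k, ""))
  | none => trait.filter (fun p => !(PySem.Str.startswith p.1 "_"))

-- Exactly the inputs where A returns normally: unless max_traits == 2, every pair of traits
-- with equal scores must carry the "_field" key (and, when the fields agree, the "_parser"
-- key), since A's trait["_field"] / trait["_parser"] would raise KeyError otherwise.
def Pre_filter_traits (name : String) (traits : List (List (String × String))) (max_traits : Int) : Prop :=
  max_traits = 2 ∨
  ((List.range traits.length).all (fun j => (List.range j).all (fun i =>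
    let ti := (traits[i]?).getD []
    let tj := (traits[j]?).getD []
    !(pyDictEq (pvPreScore name ti) (pvPreScore name tj))
      || ((List.lookup "_field" ti).isSome && (List.lookup "_field" tj).isSome
          && (!((List.lookup "_field" ti).getD "" == (List.lookup "_field" tj).getD "")
              || ((List.lookup "_parser" ti).isSome && (List.lookup "_parser" tj).isSome)))))
   = true)

instance (name : String) (traits : List (List (String × String))) (max_traits : Int) : Decidable (Pre_filter_traits name traits max_traits) := by unfold Pre_filter_traits; infer_instance

def pvWitness_filter_traits : String × (List (List (String × String))) × Int :=
  ("x", [[("_field", "f"), ("_parser", "p"), ("a", "1")],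
         [("_field", "f"), ("_parser", "q"), ("a", "1")]], 3)

def Spec_filter_traits (name : String) (traits : List (List (String × String))) (max_traits : Int) (out : List (List (String × String))) : Prop := out = filter_traits_alt name traits max_traits
instance (name : String) (traits : List (List (String × String))) (max_traits : Int) (out : List (List (String × String))) : Decidable (Spec_filter_traits name traits max_traits out) := by unfold Spec_filter_traits; infer_instance

-- ===== CLAIM (what is proved, stated in full; the proofs are below) =====
def Claim_equal_filter_traits : Prop := ∀ (name : String) (traits : List (List (String × String))) (max_traits : Int), Dom_filter_traits name traits max_traits → Pre_filter_traits name traits max_traits → Spec_filter_traits name traits max_traits (filter_traits name traits max_traits)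

-- ===== LEMMAS AND PROOFS =====

-- proof-side abbreviations
def pvSc (name : String) (traits : List (List (String × String))) (i : Nat) : List (String × String) :=
  ((pvScoresOf name traits)[i]?).getD []

def pvNf (traits : List (List (String × String))) (i : Nat) : Nat :=
  ((traits[i]?).getD []).countP (fun p => !(PySem.Str.startswith p.1 "_"))

def pvVict (traits : List (List (String × String))) (p : Nat × Nat) : Nat :=
  if pvNf traits p.2 > pvNf traits p.1 then p.1 else p.2

def pvCond (traits : List (List (String × String))) (max_traits : Int) (p : Nat × Nat) : Bool :=
  decide (max_traits = 2)
  || !((List.lookup "_field" ((traits[p.1]?).getD [])).getD ""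
       == (List.lookup "_field" ((traits[p.2]?).getD [])).getD "")
  || !((List.lookup "_parser" ((traits[p.1]?).getD [])).getD ""
       == (List.lookup "_parser" ((traits[p.2]?).getD [])).getD "")

def pvEqv (name : String) (traits : List (List (String × String))) (i j : Nat) : Bool :=
  pyDictEq (pvSc name traits i) (pvSc name traits j)

def pvPairs (n : Nat) : List (Nat × Nat) :=
  (List.range n).flatMap (fun i => ((List.range n).drop (i+1)).map (fun j => (i, j)))

def pvIp (g : List Nat) : List (Nat × Nat) :=
  (pvPairs g.length).map (fun q => ((g[q.1]?).getD 0, (g[q.2]?).getD 0))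

def pvGroups (name : String) (traits : List (List (String × String))) : List (List Nat) :=
  (List.range traits.length).foldl (fun gs i => pvPlace (pvScoresOf name traits) gs i) []

def pvStep (traits : List (List (String × String))) (max_traits : Int)
    (w : List Bool) (p : Nat × Nat) : List Bool :=
  if pvCond traits max_traits p then w.set (pvVict traits p) false else w

def pvStepA (name : String) (traits : List (List (String × String))) (max_traits : Int)
    (w : List Bool) (p : Nat × Nat) : List Bool :=
  if pvEqv name traits p.1 p.2 && pvCond traits max_traits p then w.set (pvVict traits p) false else w

-- lookup facts
lemma pv_lookup_some_mem {β : Type} (d : List (String × β)) (k : String) (v : β)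
    (h : List.lookup k d = some v) : ∃ p ∈ d, p.1 = k := by
  induction d with
  | nil => simp [List.lookup] at h
  | cons q rest ih =>
      by_cases hk : k = q.1
      · exact ⟨q, by simp, hk.symm⟩
      · rw [List.lookup_cons] at h
        simp only [show (k == q.1) = false by simpa using hk] at h
        rcases ih h with ⟨p, hp, he⟩
        exact ⟨p, by simp [hp], he⟩

lemma pyDictEq_iff (a b : List (String × String)) :
    pyDictEq a b = true ↔ ∀ k, List.lookup k a = List.lookup k b := by
  constructor
  · intro h k
    simp only [pyDictEq, Bool.and_eq_true, List.all_eq_true] at h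
    obtain ⟨h1, h2⟩ := h
    cases ha : List.lookup k a with
    | some v =>
        rcases pv_lookup_some_mem a k v ha with ⟨p, hp, hpk⟩
        have hb := h1 p hp
        rw [hpk, beq_iff_eq] at hb
        rw [hb, ha]
    | none =>
        cases hb : List.lookup k b with
        | none => rfl
        | some w =>
            rcases pv_lookup_some_mem b k w hb with ⟨p, hp, hpk⟩
            have hc := h2 p hp
            rw [hpk, beq_iff_eq, ha, hb] at hc
            exact hc
  · intro h
    simp only [pyDictEq, Bool.and_eq_true, List.all_eq_true]
    refine ⟨fun p _ => ?_, fun p _ => ?_⟩ <;> simp [h p.1]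

lemma pyDictEq_refl (a : List (String × String)) : pyDictEq a a = true := by
  simp [pyDictEq_iff]

lemma pyDictEq_symm {a b : List (String × String)} (h : pyDictEq a b = true) :
    pyDictEq b a = true := by
  rw [pyDictEq_iff] at h ⊢; intro k; exact (h k).symm

lemma pyDictEq_trans {a b c : List (String × String)} (h1 : pyDictEq a b = true)
    (h2 : pyDictEq b c = true) : pyDictEq a c = true := by
  rw [pyDictEq_iff] at h1 h2 ⊢; intro k; exact (h1 k).trans (h2 k)

-- the kill-flag fold
lemma killfold_getElem? {α : Type} (l : List α) (c : α → Bool) (v : α → Nat) (w : List Bool)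
    (k : Nat) (hv : ∀ p ∈ l, v p < w.length) :
    (l.foldl (fun w p => if c p then w.set (v p) false else w) w)[k]? =
      if l.any (fun p => c p && (v p == k)) then some false else w[k]? := by
  induction l generalizing w with
  | nil => simp
  | cons p l ih =>
      have hlen : (if c p then w.set (v p) false else w).length = w.length := by
        by_cases h : c p <;> simp [h]
      have hv' : ∀ q ∈ l, v q < (if c p then w.set (v p) false else w).length := by
        intro q hq; rw [hlen]; exact hv q (by simp [hq])
      simp only [List.foldl_cons, List.any_cons]
      rw [ih _ hv']
      by_cases hc : c p = true
      · by_cases hk : v p = k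
        · subst hk
          have hlt : v p < w.length := hv p (by simp)
          by_cases ha : l.any (fun q => c q && (v q == v p)) = true
          · simp [ha, hc]
          · simp [ha, hc, List.getElem?_set_self hlt]
        · have hset : (w.set (v p) false)[k]? = w[k]? := List.getElem?_set_ne hk
          have hbk : (v p == k) = false := by simpa using hk
          simp [hc, hset, hbk]
      · have hcf : c p = false := by simpa using hc
        simp [hcf]

-- folds over concatenated structure
lemma foldl_flatMap {α β γ : Type} (l : List α) (f : α → List β) (step : γ → β → γ) (w : γ) :
    l.foldl (fun w a => (f a).foldl step w) w = (l.flatMap f).foldl step w := by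
  induction l generalizing w with
  | nil => rfl
  | cons a l ih => simp [List.foldl_append, ih]

lemma pv_mem_drop_range (n a b : Nat) : b ∈ (List.range n).drop (a+1) ↔ a + 1 ≤ b ∧ b < n := by
  rw [List.range_eq_range', List.drop_range', List.mem_range'_1]
  omega

lemma mem_pvPairs (n : Nat) (p : Nat × Nat) : p ∈ pvPairs n ↔ p.1 < p.2 ∧ p.2 < n := by
  obtain ⟨i, j⟩ := p
  simp only [pvPairs, List.mem_flatMap, List.mem_map, List.mem_range]
  constructor
  · rintro ⟨i', hi', j', hj', he⟩
    obtain ⟨h1, h2⟩ := (pv_mem_drop_range n i' j').1 hj'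
    injection he with e1 e2
    subst e1; subst e2
    exact ⟨by omega, h2⟩
  · rintro ⟨hij, hj⟩
    exact ⟨i, by omega, j, (pv_mem_drop_range n i j).2 ⟨by omega, hj⟩, rfl⟩

lemma pv_headD_append (g : List Nat) (i : Nat) (h : g ≠ []) : (g ++ [i]).headD 0 = g.headD 0 := by
  cases g with
  | nil => exact absurd rfl h
  | cons x xs => rfl

lemma pvPlace_heads (scores : List (List (String × String))) (i : Nat) :
    ∀ (gs : List (List Nat)), (∀ g ∈ gs, g ≠ []) →
    ∀ g' ∈ pvPlace scores gs i, g'.headD 0 = i ∨ ∃ g'' ∈ gs, g'.headD 0 = g''.headD 0 := by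
  intro gs
  induction gs with
  | nil => intro _ g' hg'; simp only [pvPlace, List.mem_singleton] at hg'; subst hg'; left; rfl
  | cons g rest ih =>
      intro hne g' hg'
      by_cases hc : pyDictEq ((scores[g.headD 0]?).getD []) ((scores[i]?).getD []) = true
      · simp only [pvPlace, if_pos hc] at hg'
        rcases List.mem_cons.1 hg' with rfl | hmem
        · right; exact ⟨g, by simp, pv_headD_append g i (hne g (by simp))⟩
        · right; exact ⟨g', List.mem_cons_of_mem _ hmem, rfl⟩
      · simp only [pvPlace, if_neg hc] at hg'
        rcases List.mem_cons.1 hg' with rfl | hmem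
        · right; exact ⟨g', by simp, rfl⟩
        · rcases ih (fun g hg => hne g (by simp [hg])) g' hmem with h | ⟨g'', hg'', he⟩
          · left; exact h
          · right; exact ⟨g'', by simp [hg''], he⟩

-- the grouping invariant, one insertion step
lemma pvPlace_inv (scores : List (List (String × String))) (i : Nat) :
    ∀ (gs : List (List Nat)),
    (∀ g ∈ gs, g ≠ []) →
    (∀ g ∈ gs, ∀ x ∈ g, x < i) →
    (∀ g ∈ gs, g.Pairwise (· < ·)) →
    (∀ g ∈ gs, ∀ x ∈ g, pyDictEq ((scores[g.headD 0]?).getD []) ((scores[x]?).getD []) = true) →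
    gs.Pairwise (fun g g' => pyDictEq ((scores[g.headD 0]?).getD []) ((scores[g'.headD 0]?).getD []) = false) →
    ((∀ x, x ∈ (pvPlace scores gs i).flatten ↔ (x ∈ gs.flatten ∨ x = i)) ∧
     (∀ g ∈ pvPlace scores gs i, g ≠ []) ∧
     (∀ g ∈ pvPlace scores gs i, g.Pairwise (· < ·)) ∧
     (∀ g ∈ pvPlace scores gs i, ∀ x ∈ g, pyDictEq ((scores[g.headD 0]?).getD []) ((scores[x]?).getD []) = true) ∧
     (pvPlace scores gs i).Pairwise (fun g g' => pyDictEq ((scores[g.headD 0]?).getD []) ((scores[g'.headD 0]?).getD []) = false)) := by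
  intro gs
  induction gs with
  | nil =>
      intro _ _ _ _ _
      refine ⟨by simp [pvPlace], by simp [pvPlace], by simp [pvPlace], ?_, by simp [pvPlace]⟩
      intro g hg x hx
      simp only [pvPlace, List.mem_singleton] at hg
      subst hg
      simp only [List.mem_singleton] at hx
      subst hx
      exact pyDictEq_refl _
  | cons g rest ih =>
      intro hne hlt hsort hhead hsep
      have hgmem : g ∈ g :: rest := by simp
      have hgne : g ≠ [] := hne g hgmem
      have hne' : ∀ g' ∈ rest, g' ≠ [] := fun g' hg' => hne g' (by simp [hg'])
      have hlt' : ∀ g' ∈ rest, ∀ x ∈ g', x < i := fun g' hg' => hlt g' (by simp [hg'])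
      have hsort' : ∀ g' ∈ rest, g'.Pairwise (· < ·) := fun g' hg' => hsort g' (by simp [hg'])
      have hhead' : ∀ g' ∈ rest, ∀ x ∈ g', pyDictEq ((scores[g'.headD 0]?).getD []) ((scores[x]?).getD []) = true :=
        fun g' hg' => hhead g' (by simp [hg'])
      obtain ⟨hsep1, hsep2⟩ := List.pairwise_cons.1 hsep
      by_cases hc : pyDictEq ((scores[g.headD 0]?).getD []) ((scores[i]?).getD []) = true
      · refine ⟨?_, ?_, ?_, ?_, ?_⟩
        · intro x
          simp only [pvPlace, if_pos hc, List.flatten_cons, List.mem_append, List.mem_singleton]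
          tauto
        · intro g' hg'
          simp only [pvPlace, if_pos hc] at hg'
          rcases List.mem_cons.1 hg' with rfl | hmem
          · simp
          · exact hne' g' hmem
        · intro g' hg'
          simp only [pvPlace, if_pos hc] at hg'
          rcases List.mem_cons.1 hg' with rfl | hmem
          · rw [List.pairwise_append]
            refine ⟨hsort g hgmem, by simp, ?_⟩
            intro a ha b hb
            simp only [List.mem_singleton] at hb
            subst hb
            exact hlt g hgmem a ha
          · exact hsort' g' hmem
        · intro g' hg' x hx
          simp only [pvPlace, if_pos hc] at hg'
          rcases List.mem_cons.1 hg' with rfl | hmem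
          · rw [pv_headD_append g i hgne]
            rcases List.mem_append.1 hx with hxg | hxi
            · exact hhead g hgmem x hxg
            · simp only [List.mem_singleton] at hxi; subst hxi; exact hc
          · exact hhead' g' hmem x hx
        · simp only [pvPlace, if_pos hc]
          rw [List.pairwise_cons]
          refine ⟨?_, hsep2⟩
          intro g' hg'
          rw [pv_headD_append g i hgne]
          exact hsep1 g' hg'
      · have hcf : pyDictEq ((scores[g.headD 0]?).getD []) ((scores[i]?).getD []) = false :=
          Bool.eq_false_iff.mpr hc
        obtain ⟨ihf, ihn, ihs, ihh, ihsep⟩ := ih hne' hlt' hsort' hhead' hsep2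
        refine ⟨?_, ?_, ?_, ?_, ?_⟩
        · intro x
          simp only [pvPlace, if_neg hc, List.flatten_cons, List.mem_append, ihf x]
          tauto
        · intro g' hg'
          simp only [pvPlace, if_neg hc] at hg'
          rcases List.mem_cons.1 hg' with rfl | hmem
          · exact hgne
          · exact ihn g' hmem
        · intro g' hg'
          simp only [pvPlace, if_neg hc] at hg'
          rcases List.mem_cons.1 hg' with rfl | hmem
          · exact hsort _ hgmem
          · exact ihs g' hmem
        · intro g' hg' x hx
          simp only [pvPlace, if_neg hc] at hg'
          rcases List.mem_cons.1 hg' with rfl | hmem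
          · exact hhead _ hgmem x hx
          · exact ihh g' hmem x hx
        · simp only [pvPlace, if_neg hc]
          rw [List.pairwise_cons]
          refine ⟨?_, ihsep⟩
          intro g' hg'
          rcases pvPlace_heads scores i rest hne' g' hg' with hh' | ⟨g'', hg'', hh'⟩
          · rw [hh']; exact hcf
          · rw [hh']; exact hsep1 g'' hg''

def pvInv (scores : List (List (String × String))) (gs : List (List Nat)) (m : Nat) : Prop :=
  (∀ x, x ∈ gs.flatten ↔ x < m) ∧
  (∀ g ∈ gs, g ≠ []) ∧
  (∀ g ∈ gs, g.Pairwise (· < ·)) ∧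
  (∀ g ∈ gs, ∀ x ∈ g, pyDictEq ((scores[g.headD 0]?).getD []) ((scores[x]?).getD []) = true) ∧
  gs.Pairwise (fun g g' => pyDictEq ((scores[g.headD 0]?).getD []) ((scores[g'.headD 0]?).getD []) = false)

lemma pv_build_inv (scores : List (List (String × String))) (m : Nat) :
    pvInv scores ((List.range m).foldl (fun gs i => pvPlace scores gs i) []) m := by
  induction m with
  | zero => exact ⟨by simp, by simp, by simp, by simp, by simp⟩
  | succ m ih =>
      rw [List.range_succ, List.foldl_append, List.foldl_cons, List.foldl_nil]
      obtain ⟨ihf, ihn, ihs, ihh, ihsep⟩ := ih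
      have hlt : ∀ g ∈ (List.range m).foldl (fun gs i => pvPlace scores gs i) [], ∀ x ∈ g, x < m :=
        fun g hg x hx => (ihf x).1 (List.mem_flatten.2 ⟨g, hg, hx⟩)
      obtain ⟨f, n2, s2, h2, sep2⟩ := pvPlace_inv scores m _ ihn hlt ihs ihh ihsep
      refine ⟨?_, n2, s2, h2, sep2⟩
      intro x
      rw [f x, ihf x]
      omega

lemma pvGroups_inv (name : String) (traits : List (List (String × String))) :
    pvInv (pvScoresOf name traits) (pvGroups name traits) traits.length :=
  pv_build_inv _ _

-- consequences of the invariant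
lemma pv_same_group (name : String) (traits : List (List (String × String))) (i j : Nat)
    (hij : i < j) (hj : j < traits.length) (he : pvEqv name traits i j = true) :
    ∃ g ∈ pvGroups name traits, i ∈ g ∧ j ∈ g := by
  obtain ⟨hf, hn, hs, hh, hsep⟩ := pvGroups_inv name traits
  rcases List.mem_flatten.1 ((hf i).2 (lt_trans hij hj)) with ⟨g, hg, hig⟩
  rcases List.mem_flatten.1 ((hf j).2 hj) with ⟨g', hg', hjg⟩
  by_cases hgg : g = g'
  · subst hgg; exact ⟨g, hg, hig, hjg⟩
  · exfalso
    have hsym : Symmetric (fun g g' : List Nat =>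
        pyDictEq (((pvScoresOf name traits)[g.headD 0]?).getD []) (((pvScoresOf name traits)[g'.headD 0]?).getD []) = false) := by
      intro a b hab
      rw [Bool.eq_false_iff] at hab ⊢
      intro h
      exact hab (pyDictEq_symm h)
    have hne := List.Pairwise.forall hsym hsep hg hg' hgg
    have e1 : pyDictEq (((pvScoresOf name traits)[g.headD 0]?).getD []) (((pvScoresOf name traits)[i]?).getD []) = true := hh g hg i hig
    have e2 : pyDictEq (((pvScoresOf name traits)[g'.headD 0]?).getD []) (((pvScoresOf name traits)[j]?).getD []) = true := hh g' hg' j hjg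
    have heq : pyDictEq (((pvScoresOf name traits)[i]?).getD []) (((pvScoresOf name traits)[j]?).getD []) = true := he
    have : pyDictEq (((pvScoresOf name traits)[g.headD 0]?).getD []) (((pvScoresOf name traits)[g'.headD 0]?).getD []) = true :=
      pyDictEq_trans (pyDictEq_trans e1 heq) (pyDictEq_symm e2)
    rw [this] at hne
    exact absurd hne (by simp)

lemma pv_mem_ip_of (g : List Nat) (hs : g.Pairwise (· < ·)) (i j : Nat)
    (hi : i ∈ g) (hj : j ∈ g) (hij : i < j) : (i, j) ∈ pvIp g := by
  obtain ⟨a, ha, hga⟩ := List.getElem_of_mem hi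
  obtain ⟨b, hb, hgb⟩ := List.getElem_of_mem hj
  have hab : a < b := by
    rcases Nat.lt_trichotomy a b with h | h | h
    · exact h
    · subst h; rw [hga] at hgb; omega
    · have := (List.pairwise_iff_getElem.1 hs) b a hb ha h
      rw [hga, hgb] at this
      omega
  simp only [pvIp, List.mem_map]
  refine ⟨(a, b), (mem_pvPairs _ _).2 ⟨hab, hb⟩, ?_⟩
  simp [List.getElem?_eq_getElem ha, List.getElem?_eq_getElem hb, hga, hgb]

lemma pv_of_mem_ip (g : List Nat) (hs : g.Pairwise (· < ·)) (p : Nat × Nat)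
    (hp : p ∈ pvIp g) : p.1 ∈ g ∧ p.2 ∈ g ∧ p.1 < p.2 := by
  simp only [pvIp, List.mem_map] at hp
  obtain ⟨q, hq, rfl⟩ := hp
  obtain ⟨hab, hb⟩ := (mem_pvPairs _ _).1 hq
  have ha : q.1 < g.length := lt_trans hab hb
  rw [List.getElem?_eq_getElem ha, List.getElem?_eq_getElem hb]
  simp only [Option.getD_some]
  exact ⟨List.getElem_mem ha, List.getElem_mem hb, (List.pairwise_iff_getElem.1 hs) q.1 q.2 ha hb hab⟩

-- the two elimination scans kill the same indices
lemma pv_killed_iff (name : String) (traits : List (List (String × String))) (max_traits : Int) (k : Nat) :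
    ((pvPairs traits.length).any (fun p => (pvEqv name traits p.1 p.2 && pvCond traits max_traits p) && (pvVict traits p == k)))
      = (((pvGroups name traits).flatMap pvIp).any (fun p => pvCond traits max_traits p && (pvVict traits p == k))) := by
  rw [Bool.eq_iff_iff]
  simp only [List.any_eq_true, Bool.and_eq_true]
  constructor
  · rintro ⟨p, hp, ⟨⟨he, hcnd⟩, hvk⟩⟩
    obtain ⟨h12, h2n⟩ := (mem_pvPairs _ _).1 hp
    obtain ⟨g, hg, hig, hjg⟩ := pv_same_group name traits p.1 p.2 h12 h2n he
    obtain ⟨_, _, hs, _, _⟩ := pvGroups_inv name traits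
    refine ⟨(p.1, p.2), List.mem_flatMap.2 ⟨g, hg, pv_mem_ip_of g (hs g hg) p.1 p.2 hig hjg h12⟩, ⟨hcnd, hvk⟩⟩
  · rintro ⟨p, hp, hcnd, hvk⟩
    obtain ⟨g, hg, hpg⟩ := List.mem_flatMap.1 hp
    obtain ⟨hf, hn, hs, hh, hsep⟩ := pvGroups_inv name traits
    obtain ⟨h1g, h2g, h12⟩ := pv_of_mem_ip g (hs g hg) p hpg
    have h2n : p.2 < traits.length := (hf p.2).1 (List.mem_flatten.2 ⟨g, hg, h2g⟩)
    have he : pvEqv name traits p.1 p.2 = true :=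
      pyDictEq_trans (pyDictEq_symm (hh g hg p.1 h1g)) (hh g hg p.2 h2g)
    exact ⟨p, (mem_pvPairs _ _).2 ⟨h12, h2n⟩, ⟨⟨he, hcnd⟩, hvk⟩⟩

-- bridging A's players and B's tables to the proof-side accessors
lemma pv_scoresOf_eq (name : String) (traits : List (List (String × String))) :
    pvScoresOf name traits = traits.map (fun t => (get_score name t).1) := by
  unfold pvScoresOf get_score
  cases List.lookup name pvCOMPARE with
  | none => simp
  | some keys => by_cases hk : keys.isEmpty <;> simp [hk]

lemma get_score_snd (name : String) (t : List (String × String)) : (get_score name t).2 = t := by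
  unfold get_score
  cases List.lookup name pvCOMPARE with
  | none => rfl
  | some keys => by_cases hk : keys.isEmpty <;> simp [hk]

lemma pv_players_fst (name : String) (traits : List (List (String × String))) (i : Nat) :
    (((traits.map (fun t => get_score name t))[i]?).getD ([], [])).1 = pvSc name traits i := by
  rw [pvSc, pv_scoresOf_eq, List.getElem?_map, List.getElem?_map]
  cases traits[i]? <;> simp

lemma pv_players_snd (name : String) (traits : List (List (String × String))) (i : Nat) :
    (((traits.map (fun t => get_score name t))[i]?).getD ([], [])).2 = (traits[i]?).getD [] := by
  rw [List.getElem?_map]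
  cases traits[i]? with
  | none => simp
  | some t => simp [get_score_snd]

lemma pv_nf_eq (traits : List (List (String × String))) (i : Nat) :
    (((traits.map (fun t => t.countP (fun p => !(PySem.Str.startswith p.1 "_"))))[i]?).getD 0) = pvNf traits i := by
  rw [List.getElem?_map]
  cases h : traits[i]? <;> simp [pvNf, h]

-- enumerate over a map
lemma pv_enumerate_map {α β : Type} (l : List α) (f : α → β) (s : Int) :
    PySem.List.enumerate (l.map f) s = (PySem.List.enumerate l s).map (fun q => (q.1, f q.2)) := by
  induction l generalizing s with
  | nil => simp [PySem.List.enumerate_nil]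
  | cons x l ih => simp [PySem.List.enumerate_cons, ih]

lemma pv_CL_eq (name : String) (traits : List (List (String × String))) (p : Nat × Nat) (w : List Bool) :
    choose_looser p.1 p.2 (traits.map (fun t => get_score name t)) w = w.set (pvVict traits p) false := by
  simp only [choose_looser, pv_players_snd, ← List.countP_eq_length_filter]
  show (if pvNf traits p.2 > pvNf traits p.1 then w.set p.1 false else w.set p.2 false)
      = w.set (if pvNf traits p.2 > pvNf traits p.1 then p.1 else p.2) false
  by_cases hn : pvNf traits p.2 > pvNf traits p.1 <;> simp [hn]

-- A in normal form
lemma pv_A_eq (name : String) (traits : List (List (String × String))) (max_traits : Int) :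
    filter_traits name traits max_traits =
      ((PySem.List.enumerate traits 0).filter
          (fun q => PySem.List.pyGetD ((pvPairs traits.length).foldl (pvStepA name traits max_traits) (List.replicate traits.length true)) q.1 false)).map
        (fun q => q.2) := by
  have h0 : filter_traits name traits max_traits =
      ((PySem.List.enumerate (traits.map (fun t => get_score name t)) 0).filter
          (fun q => PySem.List.pyGetD
            ((pvPairs traits.length).foldl
              (fun (w : List Bool) (p : Nat × Nat) =>
                if pyDictEq (((traits.map (fun t => get_score name t))[p.1]?).getD ([], [])).1
                    (((traits.map (fun t => get_score name t))[p.2]?).getD ([], [])).1 then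
                  if max_traits = 2 then choose_looser p.1 p.2 (traits.map (fun t => get_score name t)) w
                  else if ((List.lookup "_field" (((traits.map (fun t => get_score name t))[p.1]?).getD ([], [])).2).getD ""
                            == (List.lookup "_field" (((traits.map (fun t => get_score name t))[p.2]?).getD ([], [])).2).getD "")
                          && !((List.lookup "_parser" (((traits.map (fun t => get_score name t))[p.1]?).getD ([], [])).2).getD ""
                            == (List.lookup "_parser" (((traits.map (fun t => get_score name t))[p.2]?).getD ([], [])).2).getD "") then
                    choose_looser p.1 p.2 (traits.map (fun t => get_score name t)) w
                  else if !((List.lookup "_field" (((traits.map (fun t => get_score name t))[p.1]?).getD ([], [])).2).getD ""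
                            == (List.lookup "_field" (((traits.map (fun t => get_score name t))[p.2]?).getD ([], [])).2).getD "") then
                    choose_looser p.1 p.2 (traits.map (fun t => get_score name t)) w
                  else w
                else w)
              (List.replicate (traits.map (fun t => get_score name t)).length true))
            q.1 false)).map (fun q => q.2.2) := rfl
  rw [h0, List.length_map]
  have hstep : (fun (w : List Bool) (p : Nat × Nat) =>
      if pyDictEq (((traits.map (fun t => get_score name t))[p.1]?).getD ([], [])).1
          (((traits.map (fun t => get_score name t))[p.2]?).getD ([], [])).1 then
        if max_traits = 2 then choose_looser p.1 p.2 (traits.map (fun t => get_score name t)) w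
        else if ((List.lookup "_field" (((traits.map (fun t => get_score name t))[p.1]?).getD ([], [])).2).getD ""
                  == (List.lookup "_field" (((traits.map (fun t => get_score name t))[p.2]?).getD ([], [])).2).getD "")
                && !((List.lookup "_parser" (((traits.map (fun t => get_score name t))[p.1]?).getD ([], [])).2).getD ""
                  == (List.lookup "_parser" (((traits.map (fun t => get_score name t))[p.2]?).getD ([], [])).2).getD "") then
          choose_looser p.1 p.2 (traits.map (fun t => get_score name t)) w
        else if !((List.lookup "_field" (((traits.map (fun t => get_score name t))[p.1]?).getD ([], [])).2).getD ""
                  == (List.lookup "_field" (((traits.map (fun t => get_score name t))[p.2]?).getD ([], [])).2).getD "") then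
          choose_looser p.1 p.2 (traits.map (fun t => get_score name t)) w
        else w
      else w) = pvStepA name traits max_traits := by
    funext w p
    simp only [pv_CL_eq, pv_players_fst, pv_players_snd]
    by_cases he : pyDictEq (pvSc name traits p.1) (pvSc name traits p.2) = true <;>
      by_cases hm : max_traits = 2 <;>
        by_cases hf : ((List.lookup "_field" ((traits[p.1]?).getD [])).getD ""
            == (List.lookup "_field" ((traits[p.2]?).getD [])).getD "") = true <;>
          by_cases hq : ((List.lookup "_parser" ((traits[p.1]?).getD [])).getD ""
              == (List.lookup "_parser" ((traits[p.2]?).getD [])).getD "") = true <;>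
            simp [pvStepA, pvEqv, pvCond, he, hm, hf, hq]
  rw [hstep, pv_enumerate_map, List.filter_map, List.map_map]
  simp [Function.comp_def, get_score_snd]

-- B's inner double loop over a group, as a fold over its index pairs
lemma pv_double_fold (g : List Nat) (step : List Bool → Nat × Nat → List Bool) (w : List Bool) :
    (List.range g.length).foldl (fun w a =>
      ((List.range g.length).drop (a+1)).foldl (fun w b => step w ((g[a]?).getD 0, (g[b]?).getD 0)) w) w
    = (pvIp g).foldl step w := by
  rw [pvIp, List.foldl_map, pvPairs, ← foldl_flatMap]
  simp only [List.foldl_map]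

-- B in normal form
lemma pv_B_eq (name : String) (traits : List (List (String × String))) (max_traits : Int) :
    filter_traits_alt name traits max_traits =
      ((PySem.List.enumerate traits 0).filter
          (fun q => PySem.List.pyGetD (((pvGroups name traits).flatMap pvIp).foldl (pvStep traits max_traits) (List.replicate traits.length true)) q.1 false)).map
        (fun q => q.2) := by
  have hbody : ∀ (w : List Bool) (i j : Nat),
      (if decide (max_traits = 2)
          || !((List.lookup "_field" ((traits[i]?).getD [])).getD ""
               == (List.lookup "_field" ((traits[j]?).getD [])).getD "")
          || !((List.lookup "_parser" ((traits[i]?).getD [])).getD ""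
               == (List.lookup "_parser" ((traits[j]?).getD [])).getD "") then
        if (((traits.map (fun t => t.countP (fun p => !(PySem.Str.startswith p.1 "_"))))[j]?).getD 0)
            > (((traits.map (fun t => t.countP (fun p => !(PySem.Str.startswith p.1 "_"))))[i]?).getD 0) then
          w.set i false
        else
          w.set j false
      else w) = pvStep traits max_traits w (i, j) := by
    intro w i j
    rw [pv_nf_eq, pv_nf_eq]
    show (if pvCond traits max_traits (i, j) then
            if pvNf traits j > pvNf traits i then w.set i false else w.set j false
          else w) = pvStep traits max_traits w (i, j)
    by_cases hc : pvCond traits max_traits (i, j) = true <;>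
      by_cases hn : pvNf traits j > pvNf traits i <;>
        simp [pvStep, pvVict, hc, hn]
  have hinner : ∀ (g : List Nat) (w : List Bool),
      (List.range g.length).foldl (fun (w : List Bool) (a : Nat) =>
        ((List.range g.length).drop (a+1)).foldl (fun (w : List Bool) (b : Nat) =>
          if decide (max_traits = 2)
             || !((List.lookup "_field" ((traits[(g[a]?).getD 0]?).getD [])).getD ""
                  == (List.lookup "_field" ((traits[(g[b]?).getD 0]?).getD [])).getD "")
             || !((List.lookup "_parser" ((traits[(g[a]?).getD 0]?).getD [])).getD ""
                  == (List.lookup "_parser" ((traits[(g[b]?).getD 0]?).getD [])).getD "") then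
            if (((traits.map (fun t => t.countP (fun p => !(PySem.Str.startswith p.1 "_"))))[(g[b]?).getD 0]?).getD 0)
                > (((traits.map (fun t => t.countP (fun p => !(PySem.Str.startswith p.1 "_"))))[(g[a]?).getD 0]?).getD 0) then
              w.set ((g[a]?).getD 0) false
            else
              w.set ((g[b]?).getD 0) false
          else w) w) w = (pvIp g).foldl (pvStep traits max_traits) w := by
    intro g w
    rw [← pv_double_fold g (pvStep traits max_traits) w]
    simp only [hbody]
  have h0 : filter_traits_alt name traits max_traits =
      ((PySem.List.enumerate traits 0).filter
          (fun q => PySem.List.pyGetD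
            ((pvGroups name traits).foldl (fun (w : List Bool) (g : List Nat) =>
                (List.range g.length).foldl (fun (w : List Bool) (a : Nat) =>
                  ((List.range g.length).drop (a+1)).foldl (fun (w : List Bool) (b : Nat) =>
                    if decide (max_traits = 2)
                       || !((List.lookup "_field" ((traits[(g[a]?).getD 0]?).getD [])).getD ""
                            == (List.lookup "_field" ((traits[(g[b]?).getD 0]?).getD [])).getD "")
                       || !((List.lookup "_parser" ((traits[(g[a]?).getD 0]?).getD [])).getD ""
                            == (List.lookup "_parser" ((traits[(g[b]?).getD 0]?).getD [])).getD "") then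
                      if (((traits.map (fun t => t.countP (fun p => !(PySem.Str.startswith p.1 "_"))))[(g[b]?).getD 0]?).getD 0)
                          > (((traits.map (fun t => t.countP (fun p => !(PySem.Str.startswith p.1 "_"))))[(g[a]?).getD 0]?).getD 0) then
                        w.set ((g[a]?).getD 0) false
                      else
                        w.set ((g[b]?).getD 0) false
                    else w) w) w)
              (List.replicate traits.length true))
            q.1 false)).map (fun q => q.2) := rfl
  rw [h0]
  simp only [hinner]
  rw [foldl_flatMap]

-- the two flag arrays coincide
lemma pv_flags_eq (name : String) (traits : List (List (String × String))) (max_traits : Int) :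
    (pvPairs traits.length).foldl (pvStepA name traits max_traits) (List.replicate traits.length true)
      = ((pvGroups name traits).flatMap pvIp).foldl (pvStep traits max_traits) (List.replicate traits.length true) := by
  apply List.ext_getElem?
  intro k
  have hvA : ∀ p ∈ pvPairs traits.length, pvVict traits p < (List.replicate traits.length true).length := by
    intro p hp
    obtain ⟨h1, h2⟩ := (mem_pvPairs _ _).1 hp
    rw [List.length_replicate, pvVict]
    split <;> omega
  have hvB : ∀ p ∈ (pvGroups name traits).flatMap pvIp, pvVict traits p < (List.replicate traits.length true).length := by
    intro p hp
    obtain ⟨g, hg, hpg⟩ := List.mem_flatMap.1 hp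
    obtain ⟨hf, hn, hs, hh, hsep⟩ := pvGroups_inv name traits
    obtain ⟨h1g, h2g, h12⟩ := pv_of_mem_ip g (hs g hg) p hpg
    have h1n : p.1 < traits.length := (hf p.1).1 (List.mem_flatten.2 ⟨g, hg, h1g⟩)
    have h2n : p.2 < traits.length := (hf p.2).1 (List.mem_flatten.2 ⟨g, hg, h2g⟩)
    rw [List.length_replicate, pvVict]
    split <;> omega
  have hA := killfold_getElem? (pvPairs traits.length)
      (fun p => pvEqv name traits p.1 p.2 && pvCond traits max_traits p)
      (pvVict traits) (List.replicate traits.length true) k hvA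
  have hB := killfold_getElem? ((pvGroups name traits).flatMap pvIp)
      (fun p => pvCond traits max_traits p)
      (pvVict traits) (List.replicate traits.length true) k hvB
  have eA : (pvPairs traits.length).foldl (pvStepA name traits max_traits) (List.replicate traits.length true)
      = (pvPairs traits.length).foldl
          (fun w p => if pvEqv name traits p.1 p.2 && pvCond traits max_traits p then w.set (pvVict traits p) false else w)
          (List.replicate traits.length true) := rfl
  have eB : ((pvGroups name traits).flatMap pvIp).foldl (pvStep traits max_traits) (List.replicate traits.length true)
      = ((pvGroups name traits).flatMap pvIp).foldl
          (fun w p => if pvCond traits max_traits p then w.set (pvVict traits p) false else w)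
          (List.replicate traits.length true) := rfl
  rw [eA, eB, hA, hB, pv_killed_iff]

-- ===== VERDICT (by name: the statement is the Claim_ definition above) =====
theorem filter_traits_spec : Claim_equal_filter_traits := by
  intro name traits max_traits _ _
  unfold Spec_filter_traits
  rw [pv_A_eq, pv_B_eq, pv_flags_eq]
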